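-- pv_equiv track=rewrite | github.com/deathbeds/importnb | src/importnb/loader.py | _get_co_flags_set
-- ===== SOURCE A (Python) =====
-- def _get_co_flags_set(co_flags):
--     """Return a deconstructed set of code flags from a code object."""
--     flags = set()
--     for i in range(12):
--         flag = 1 << i
--         if co_flags & flag:
--             flags.add(flag)
--             co_flags ^= flag
--             if not co_flags:
--                 break
--     else:
--         flags.intersection_update(flags)
--     return flags
-- ===== SOURCE B (Python) =====
-- def _get_co_flags_set(co_flags):
--     """Return a deconstructed set of code flags from a code object."""
--     m = co_flags & 0xFFF
--     flags = set()
--     while m: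
--         low = m & -m
--         flags.add(low)
--         m &= m - 1
--     return flags
-- ===== Notes on version B (the rewrite author's own statement) =====
-- stated objective: idiomatic
-- what changed: Instead of scanning all 12 fixed bit positions while mutating the flag word with xor and a break, B masks once with 0xFFF and then iterates only over the set bits, extracting each lowest set bit with m & -m and clearing it with m &= m - 1.
import Mathlib
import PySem

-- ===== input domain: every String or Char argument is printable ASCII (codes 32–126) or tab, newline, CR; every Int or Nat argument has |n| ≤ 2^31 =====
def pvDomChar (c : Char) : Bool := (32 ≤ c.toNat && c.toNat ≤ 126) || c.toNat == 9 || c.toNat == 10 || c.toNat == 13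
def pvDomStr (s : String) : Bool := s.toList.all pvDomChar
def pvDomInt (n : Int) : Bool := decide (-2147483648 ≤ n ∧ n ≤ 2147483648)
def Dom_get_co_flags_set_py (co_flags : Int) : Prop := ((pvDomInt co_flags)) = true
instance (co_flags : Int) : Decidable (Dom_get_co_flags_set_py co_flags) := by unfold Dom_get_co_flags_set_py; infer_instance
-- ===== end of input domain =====

-- B replaces A's scan of the 12 fixed bit positions (with xor-mutation and break) by a
-- mask with 0xFFF followed by a lowest-set-bit extraction loop (m & -m / m &= m-1): idiomatic, not faster.


-- ===== PORT A =====
-- the loop 'for i in range(12): …' over mutable (flags, co_flags) with break;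
-- at the end of a break-less run the for-else arm does flags.intersection_update(flags) (a no-op).
def getFlagsLoopA : List Nat → List Int → Int → List Int
  | [], flags, _ => PySem.Set.inter flags flags
  | i :: rest, flags, co_flags =>
    let flag : Int := 1 <<< i
    if PySem.Int.band co_flags flag ≠ 0 then
      let flags' := PySem.Set.add flags flag
      let co' := PySem.Int.bxor co_flags flag
      if co' = 0 then flags' else getFlagsLoopA rest flags' co'
    else getFlagsLoopA rest flags co_flags

def get_co_flags_set_py (co_flags : Int) : List Int :=
  getFlagsLoopA (List.range 12) PySem.Set.empty co_flags

-- ===== PORT B =====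
-- 'while m:' ported with fuel 12 as a totality guard only: m = co_flags & 0xFFF satisfies
-- 0 ≤ m < 4096, so the Python loop runs at most 12 iterations and the fuel is never exhausted.
def popLoopB : Nat → List Int → Int → List Int
  | 0, flags, _ => flags
  | fuel+1, flags, m =>
    if m = 0 then flags
    else
      let low := PySem.Int.band m (-m)
      popLoopB fuel (PySem.Set.add flags low) (PySem.Int.band m (m - 1))

def get_co_flags_set_py_alt (co_flags : Int) : List Int :=
  popLoopB 12 PySem.Set.empty (PySem.Int.band co_flags 0xFFF)

-- ===== PRECONDITION & SPEC =====
def Spec_get_co_flags_set_py (co_flags : Int) (out : List Int) : Prop := out = get_co_flags_set_py_alt co_flags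
instance (co_flags : Int) (out : List Int) : Decidable (Spec_get_co_flags_set_py co_flags out) := by unfold Spec_get_co_flags_set_py; infer_instance

-- ===== CLAIM (what is proved, stated in full; the proofs are below) =====
def Claim_equal_get_co_flags_set_py : Prop := ∀ (co_flags : Int), Dom_get_co_flags_set_py co_flags → Spec_get_co_flags_set_py co_flags (get_co_flags_set_py co_flags)

-- ===== LEMMAS AND PROOFS =====

-- 1 << i on the Int side is the cast of the Nat power
theorem pvShift (i : Nat) : ((1:Int) <<< i) = ((2^i : Nat) : Int) := by
  show Int.ofNat (1 <<< i) = _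
  rw [Nat.shiftLeft_eq, one_mul]
  rfl

-- evaluation of PySem band/bxor on a negative first and a cast second argument
theorem pvBandNegSucc (n p : Nat) :
    PySem.Int.band (Int.negSucc n) (Int.ofNat p) = Int.ofNat (p - (p &&& n)) := by
  have h1 : ¬ (0:Int) ≤ Int.negSucc n := by simp [Int.negSucc_eq]; omega
  have h3 : (-(Int.negSucc n) - 1).toNat = n := by simp [Int.negSucc_eq]
  simp only [PySem.Int.band, if_neg h1, h3, Int.ofNat_eq_natCast, Int.toNat_natCast,
    if_pos (Int.natCast_nonneg p)]

theorem pvBxorNegSucc (n p : Nat) :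
    PySem.Int.bxor (Int.negSucc n) (Int.ofNat p) = Int.negSucc (n ^^^ p) := by
  have h1 : ¬ (0:Int) ≤ Int.negSucc n := by simp [Int.negSucc_eq]; omega
  have h3 : (-(Int.negSucc n) - 1).toNat = n := by simp [Int.negSucc_eq]
  simp only [PySem.Int.bxor, if_neg h1, h3, Int.ofNat_eq_natCast, Int.toNat_natCast,
    if_pos (Int.natCast_nonneg p)]
  simp [Int.negSucc_eq]
  omega

-- the bits of m split into those shared with n and the rest
theorem pvLandAddLdiff (m n : Nat) : (m &&& n) + m.ldiff n = m := by
  induction m using Nat.binaryRec generalizing n with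
  | zero =>
    have h1 : (0:Nat) &&& n = 0 := Nat.zero_and n
    have h2 : Nat.ldiff 0 n = 0 :=
      Nat.zero_of_testBit_eq_false (fun i => by simp [Nat.testBit_ldiff, Nat.zero_testBit])
    simp [h1, h2]
  | bit b m ih =>
    have hd : n = Nat.bit n.bodd n.div2 := (Nat.bit_bodd_div2 n).symm
    rw [hd, Nat.land_bit, Nat.ldiff_bit]
    have := ih n.div2
    simp only [Nat.bit]
    cases b <;> cases hb : n.bodd <;> simp <;> omega

theorem pvSubLand (m n : Nat) : m - (m &&& n) = m.ldiff n := by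
  have h := pvLandAddLdiff m n
  omega

-- a single-bit test on a Nat via masking
theorem pvNatAndPow (n i : Nat) : (n &&& 2^i ≠ 0) ↔ n.testBit i = true := by
  rw [Nat.and_two_pow]
  cases h : n.testBit i <;> simp

-- xor with bit i does not change the masked bit j ≠ i (Nat level)
theorem pvNatXorOther (n i j : Nat) (hij : i ≠ j) : (n ^^^ 2^i) &&& 2^j = n &&& 2^j := by
  apply Nat.eq_of_testBit_eq
  intro k
  by_cases hk : k = j
  · subst hk
    simp [Nat.testBit_land, Nat.testBit_xor, Nat.testBit_two_pow, hij]
  · simp [Nat.testBit_land, Nat.testBit_two_pow, (Ne.symm hk)]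

-- the bit predicate of an Int, as A's band tests see it
def pvCondN (c : Int) (i : Nat) : Bool :=
  match c with | Int.ofNat n => n.testBit i | Int.negSucc n => !n.testBit i

-- single-bit test through PySem band, any sign
theorem pvBandBit (c : Int) (i : Nat) :
    (PySem.Int.band c ((1:Int) <<< i) ≠ 0) ↔ pvCondN c i = true := by
  rw [pvShift]
  cases c with
  | ofNat n =>
    rw [Int.ofNat_eq_natCast, PySem.Int.band_natCast]
    simp only [ne_eq, Int.natCast_eq_zero, pvCondN]
    exact pvNatAndPow n i
  | negSucc n =>
    rw [show ((2^i : Nat) : Int) = Int.ofNat (2^i) from rfl, pvBandNegSucc]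
    have hp : 0 < 2^i := Nat.two_pow_pos i
    rw [Nat.land_comm (2^i) n, Nat.and_two_pow]
    simp only [Int.ofNat_eq_natCast, ne_eq, Int.natCast_eq_zero, pvCondN]
    cases h : n.testBit i <;> simp <;> omega

-- xor with bit i does not change the band test at bit j ≠ i
theorem pvBxorOther (c : Int) (i j : Nat) (hij : i ≠ j) :
    PySem.Int.band (PySem.Int.bxor c ((1:Int) <<< i)) ((1:Int) <<< j)
      = PySem.Int.band c ((1:Int) <<< j) := by
  rw [pvShift, pvShift]
  cases c with
  | ofNat n =>
    rw [Int.ofNat_eq_natCast, PySem.Int.bxor_natCast, PySem.Int.band_natCast,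
      PySem.Int.band_natCast, pvNatXorOther n i j hij]
  | negSucc n =>
    rw [show ((2^i : Nat) : Int) = Int.ofNat (2^i) from rfl, pvBxorNegSucc,
      show ((2^j : Nat) : Int) = Int.ofNat (2^j) from rfl, pvBandNegSucc, pvBandNegSucc]
    rw [Nat.land_comm (2^j) (n ^^^ 2^i), Nat.land_comm (2^j) n, pvNatXorOther n i j hij]

-- two distinct single bits are disjoint
theorem pvBitsDisjoint (i j : Nat) (hij : i ≠ j) :
    PySem.Int.band ((1:Int) <<< i) ((1:Int) <<< j) = 0 := by
  rw [pvShift, pvShift, PySem.Int.band_natCast]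
  have : 2^i &&& 2^j = 0 := by
    apply Nat.eq_of_testBit_eq
    intro k
    simp [Nat.testBit_land, Nat.testBit_two_pow, Nat.zero_testBit]
    omega
  simp [this]

-- xor equal to zero forces equality
theorem pvBxorZero (c : Int) (i : Nat) (h : PySem.Int.bxor c ((1:Int) <<< i) = 0) :
    c = (1:Int) <<< i := by
  rw [pvShift] at *
  cases c with
  | ofNat n =>
    rw [Int.ofNat_eq_natCast, PySem.Int.bxor_natCast] at h
    have : n ^^^ 2^i = 0 := by exact_mod_cast h
    have := Nat.xor_eq_zero.mp this
    simp [Int.ofNat_eq_natCast, this]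
  | negSucc n =>
    rw [show ((2^i : Nat) : Int) = Int.ofNat (2^i) from rfl, pvBxorNegSucc] at h
    exact absurd h (by simp [Int.negSucc_eq]; omega)

-- single-bit flag values are injective in the position
theorem pvShiftInj (i j : Nat) (h : ((1:Int) <<< i) = ((1:Int) <<< j)) : i = j := by
  rw [pvShift, pvShift] at h
  have : (2:Nat)^i = 2^j := by exact_mod_cast h
  exact Nat.pow_right_injective (by norm_num) this

-- reference list of flag values selected by a bit predicate
def pvRef (f : Nat → Bool) (l : List Nat) : List Int :=
  l.foldr (fun i acc => if f i then ((1:Int) <<< i) :: acc else acc) []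

theorem pvRef_congr (f g : Nat → Bool) (l : List Nat) (h : ∀ i ∈ l, f i = g i) :
    pvRef f l = pvRef g l := by
  induction l with
  | nil => rfl
  | cons a l ih =>
    simp only [pvRef, List.foldr_cons] at *
    rw [h a (by simp), ih (fun i hi => h i (by simp [hi]))]

theorem pvRef_nil (f : Nat → Bool) (l : List Nat) (h : ∀ i ∈ l, f i = false) :
    pvRef f l = [] := by
  induction l with
  | nil => rfl
  | cons a l ih =>
    simp only [pvRef, List.foldr_cons] at *
    rw [h a (by simp), ih (fun i hi => h i (by simp [hi]))]
    simp

theorem pvSetAdd (s : List Int) (x : Int) (hx : x ∉ s) : PySem.Set.add s x = s ++ [x] := by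
  simp [PySem.Set.add, PySem.Set.contains, hx]

theorem pvInterSelf (s : List Int) : PySem.Set.inter s s = s := by
  simp only [PySem.Set.inter, PySem.Set.contains]
  exact List.filter_eq_self.mpr (fun a ha => by simpa using ha)

-- invariant of A's loop: it appends exactly the selected flags, in position order
theorem pvALoop (l : List Nat) (hnd : l.Nodup) :
    ∀ (flags : List Int) (c : Int), (∀ j ∈ l, ((1:Int) <<< j) ∉ flags) →
    getFlagsLoopA l flags c = flags ++ pvRef (pvCondN c) l := by
  induction l with
  | nil => intro flags c _; simp [getFlagsLoopA, pvRef, pvInterSelf]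
  | cons i rest ih =>
    intro flags c hmem
    have hndr : rest.Nodup := (List.nodup_cons.mp hnd).2
    have hir : i ∉ rest := (List.nodup_cons.mp hnd).1
    show (if PySem.Int.band c ((1:Int) <<< i) ≠ 0 then
        let flags' := PySem.Set.add flags ((1:Int) <<< i)
        let co' := PySem.Int.bxor c ((1:Int) <<< i)
        if co' = 0 then flags' else getFlagsLoopA rest flags' co'
      else getFlagsLoopA rest flags c) = flags ++ pvRef (pvCondN c) (i :: rest)
    by_cases hc : PySem.Int.band c ((1:Int) <<< i) ≠ 0
    · have hcond : pvCondN c i = true := (pvBandBit c i).mp hc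
      have hadd : PySem.Set.add flags ((1:Int) <<< i) = flags ++ [(1:Int) <<< i] :=
        pvSetAdd flags _ (hmem i (by simp))
      rw [if_pos hc]
      simp only [pvRef, List.foldr_cons, hcond, if_pos]
      by_cases hz : PySem.Int.bxor c ((1:Int) <<< i) = 0
      · rw [if_pos hz, hadd]
        have hflag : c = (1:Int) <<< i := pvBxorZero c i hz
        have hrest : pvRef (pvCondN c) rest = [] := by
          apply pvRef_nil
          intro j hj
          have hij : i ≠ j := fun h => hir (h ▸ hj)
          have : ¬ (PySem.Int.band c ((1:Int) <<< j) ≠ 0) := by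
            rw [hflag, pvBitsDisjoint i j hij]
            simp
          cases h : pvCondN c j
          · rfl
          · exact absurd ((pvBandBit c j).mpr h) this
        rw [show pvRef (pvCondN c) rest = List.foldr
            (fun i acc => if pvCondN c i = true then ((1:Int) <<< i) :: acc else acc) [] rest
          from rfl] at hrest
        rw [hrest]
      · rw [if_neg hz, hadd]
        have hmem' : ∀ j ∈ rest, ((1:Int) <<< j) ∉ flags ++ [(1:Int) <<< i] := by
          intro j hj
          simp only [List.mem_append, List.mem_singleton]
          rintro (h | h)
          · exact hmem j (by simp [hj]) h
          · exact hir ((pvShiftInj j i h) ▸ hj)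
        rw [ih hndr (flags ++ [(1:Int) <<< i]) (PySem.Int.bxor c ((1:Int) <<< i)) hmem']
        have hcong : pvRef (pvCondN (PySem.Int.bxor c ((1:Int) <<< i))) rest
            = pvRef (pvCondN c) rest := by
          apply pvRef_congr
          intro j hj
          have hij : i ≠ j := fun h => hir (h ▸ hj)
          have hb := pvBxorOther c i j hij
          cases h : pvCondN c j with
          | true =>
            exact (pvBandBit _ j).mp (by rw [hb]; exact (pvBandBit c j).mpr h)
          | false =>
            cases h' : pvCondN (PySem.Int.bxor c ((1:Int) <<< i)) j with
            | false => rfl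
            | true =>
              have := (pvBandBit _ j).mpr h'
              rw [hb] at this
              rw [(pvBandBit c j).mp this] at h
              exact absurd h (by simp)
        rw [hcong]
        show (flags ++ [(1:Int) <<< i]) ++ pvRef (pvCondN c) rest = _
        simp [pvRef]
    · have hcond : pvCondN c i = false := by
        cases h : pvCondN c i
        · rfl
        · exact absurd ((pvBandBit c i).mpr h) hc
      rw [if_neg hc, ih hndr flags c (fun j hj => hmem j (by simp [hj]))]
      simp only [pvRef, List.foldr_cons, hcond]
      simp

-- the masked value: a Nat below 4096 whose bits agree with c's low 12 band tests
theorem pvMask (c : Int) : ∃ k : Nat, k < 4096 ∧ PySem.Int.band c 4095 = (k : Int) ∧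
    ∀ i < 12, pvCondN c i = k.testBit i := by
  have h4095 : (4095 : Nat) = 2^12 - 1 := by norm_num
  cases c with
  | ofNat n =>
    refine ⟨n &&& 4095, by have := @Nat.and_le_right n 4095; omega, ?_, ?_⟩
    · rw [show (4095:Int) = ((4095:Nat):Int) from rfl, Int.ofNat_eq_natCast,
        PySem.Int.band_natCast]
    · intro i hi
      show n.testBit i = (n &&& 4095).testBit i
      rw [Nat.testBit_land, h4095, Nat.testBit_two_pow_sub_one]
      simp [hi]
  | negSucc n =>
    refine ⟨4095 - (4095 &&& n), by omega, ?_, ?_⟩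
    · rw [show (4095:Int) = Int.ofNat 4095 from rfl, pvBandNegSucc, Int.ofNat_eq_natCast]
    · intro i hi
      rw [pvSubLand]
      show (!n.testBit i) = (Nat.ldiff 4095 n).testBit i
      rw [Nat.testBit_ldiff, h4095, Nat.testBit_two_pow_sub_one]
      simp [hi]

-- B's loop restated over the Nat value of its (always non-negative) state
def pvPopN : Nat → List Int → Nat → List Int
  | 0, flags, _ => flags
  | fuel+1, flags, k =>
    if k = 0 then flags
    else
      let low : Int := Int.ofNat (k - (k &&& (k - 1)))
      pvPopN fuel (PySem.Set.add flags low) (k &&& (k - 1))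

theorem pvPopBridge (fuel : Nat) : ∀ (flags : List Int) (k : Nat),
    popLoopB fuel flags (Int.ofNat k) = pvPopN fuel flags k := by
  induction fuel with
  | zero => intro flags k; rfl
  | succ fuel ih =>
    intro flags k
    show (if (Int.ofNat k) = 0 then flags else
        popLoopB fuel (PySem.Set.add flags (PySem.Int.band (Int.ofNat k) (-(Int.ofNat k))))
          (PySem.Int.band (Int.ofNat k) ((Int.ofNat k) - 1)))
      = (if k = 0 then flags else
        pvPopN fuel (PySem.Set.add flags (Int.ofNat (k - (k &&& (k - 1))))) (k &&& (k - 1)))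
    by_cases hk : k = 0
    · subst hk; simp
    · rw [if_neg (by simpa using hk), if_neg hk]
      have hk1 : (1:Int) ≤ Int.ofNat k := by
        simp only [Int.ofNat_eq_natCast]; exact_mod_cast Nat.one_le_iff_ne_zero.mpr hk
      have hlow : PySem.Int.band (Int.ofNat k) (-(Int.ofNat k)) =
          Int.ofNat (k - (k &&& (k - 1))) := by
        have ha : (0:Int) ≤ ((k:Nat):Int) := Int.natCast_nonneg k
        have hb : ¬ (0:Int) ≤ -((k:Nat):Int) := by
          simp only [Int.ofNat_eq_natCast] at hk1
          omega
        simp only [PySem.Int.band, Int.ofNat_eq_natCast]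
        rw [if_pos ha, if_neg hb]
        have e1 : ((k:Nat):Int).toNat = k := Int.toNat_natCast k
        have e2 : (-(-((k:Nat):Int)) - 1).toNat = k - 1 := by omega
        rw [e1, e2]
      have hstep : PySem.Int.band (Int.ofNat k) ((Int.ofNat k) - 1) =
          Int.ofNat (k &&& (k - 1)) := by
        have h1 : (Int.ofNat k) - 1 = Int.ofNat (k - 1) := by
          simp only [Int.ofNat_eq_natCast]; omega
        rw [h1, Int.ofNat_eq_natCast, Int.ofNat_eq_natCast, PySem.Int.band_natCast,
          Int.ofNat_eq_natCast]
      rw [hlow, hstep, ih]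

-- B's Nat loop evaluated on every possible masked value
set_option maxRecDepth 10000 in
set_option maxHeartbeats 2000000 in
theorem pvBLoopN : ∀ a < 16, ∀ b < 256,
    pvPopN 12 PySem.Set.empty (256*a+b)
      = pvRef (fun i => (256*a+b).testBit i) (List.range 12) := by
  decide

theorem pvBLoop (k : Nat) (hk : k < 4096) :
    popLoopB 12 PySem.Set.empty (Int.ofNat k) = pvRef (fun i => k.testBit i) (List.range 12) := by
  rw [pvPopBridge]
  have hd : k = 256*(k/256) + k%256 := by omega
  have := pvBLoopN (k/256) (by omega) (k%256) (by omega)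
  rw [← hd] at this
  exact this

-- ===== VERDICT (by name: the statement is the Claim_ definition above) =====
theorem get_co_flags_set_py_spec : Claim_equal_get_co_flags_set_py := by
  intro c _
  unfold Spec_get_co_flags_set_py get_co_flags_set_py get_co_flags_set_py_alt
  obtain ⟨k, hk, hmask, hbits⟩ := pvMask c
  have hA : getFlagsLoopA (List.range 12) PySem.Set.empty c = pvRef (pvCondN c) (List.range 12) := by
    simpa using pvALoop (List.range 12) (List.nodup_range) PySem.Set.empty c
      (by intro j _ h; simp [PySem.Set.empty] at h)
  have h4 : (0xFFF : Int) = (4095 : Int) := by norm_num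
  rw [hA, h4, hmask]
  rw [pvRef_congr (pvCondN c) (fun i => k.testBit i) (List.range 12)
    (fun i hi => hbits i (List.mem_range.mp hi))]
  exact (pvBLoop k hk).symm
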